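-- pv_equiv track=rewrite | github.com/Leon-trainee/ml_tools | m3u8_download.py | filter_ad_segments
-- ===== SOURCE A (Python) =====
-- def filter_ad_segments(m3u8_content):
--     """
--     Filter out advertisement segments based on EXT-X-DISCONTINUITY tags.
--
--     Rules:
--     - Keep content after first #EXT-X-DISCONTINUITY
--     - Remove segments between 2nd and 3rd #EXT-X-DISCONTINUITY tags
--     - Continue pattern: remove segments between 4th-5th, 6th-7th, etc.
--
--     Args:
--         m3u8_content (str): Raw m3u8 file content
--
--     Returns:
--         str: Filtered m3u8 content without advertisement segments
--     """
--     lines = m3u8_content.strip().split('\n')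
--     filtered_lines = []
--
--     discontinuity_count = 0
--     skip_segment = False
--
--     for line in lines:
--         if line.startswith('#EXT-X-DISCONTINUITY'):
--             discontinuity_count += 1
--
--             # First discontinuity: keep content after it
--             if discontinuity_count == 1:
--                 filtered_lines.append(line)
--                 skip_segment = False
--             # Even numbered discontinuities (2, 4, 6...): start skipping
--             elif discontinuity_count % 2 == 0:
--                 skip_segment = True
--             # Odd numbered discontinuities (3, 5, 7...): stop skipping
--             else:
--                 skip_segment = False
--                 filtered_lines.append(line)
--         elif not skip_segment:
--             filtered_lines.append(line)
--
--     return '\n'.join(filtered_lines)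
-- ===== SOURCE B (Python) =====
-- def filter_ad_segments(m3u8_content):
--     lines = m3u8_content.strip().split('\n')
--     tags = [i for i, line in enumerate(lines)
--             if line.startswith('#EXT-X-DISCONTINUITY')]
--     intervals = []
--     rest = tags[1:]
--     while rest:
--         end = rest[1] if len(rest) > 1 else len(lines)
--         intervals.append((rest[0], end))
--         rest = rest[2:]
--     return '\n'.join(line for i, line in enumerate(lines)
--                      if not any(s <= i < e for s, e in intervals))
-- ===== Notes on version B (the rewrite author's own statement) =====
-- stated objective: alternative
-- what changed: Replaced the running discontinuity-count/skip-flag state machine with a declarative index-table structure: one pass collects the positions of discontinuity tags, consecutive pairs of the tags after the first are turned into removal intervals, and the output keeps exactly the lines whose index falls in no interval.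
import Mathlib
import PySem

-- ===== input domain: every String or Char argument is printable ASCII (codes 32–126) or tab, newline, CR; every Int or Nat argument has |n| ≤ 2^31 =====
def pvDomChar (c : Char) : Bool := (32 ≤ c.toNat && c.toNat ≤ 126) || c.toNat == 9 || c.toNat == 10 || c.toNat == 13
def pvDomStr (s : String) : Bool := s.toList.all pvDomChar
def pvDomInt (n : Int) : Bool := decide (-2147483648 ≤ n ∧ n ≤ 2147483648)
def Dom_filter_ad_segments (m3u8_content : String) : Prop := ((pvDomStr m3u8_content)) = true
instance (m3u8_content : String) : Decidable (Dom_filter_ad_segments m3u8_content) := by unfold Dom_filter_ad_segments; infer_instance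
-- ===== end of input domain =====

-- B replaces A's running count/skip-flag state machine by an index table: collect tag
-- positions, pair them into removal intervals, keep lines outside all intervals (alternative decomposition, same result).


-- ===== PORT A =====
-- the tag test both Pythons perform (line.startswith('#EXT-X-DISCONTINUITY'))
def pvIsTag (line : String) : Bool := PySem.Str.startswith line "#EXT-X-DISCONTINUITY"

-- A's loop body over state (discontinuity_count, skip_segment, filtered_lines)
def pvStepA (st : Int × Bool × List String) (line : String) : Int × Bool × List String :=
  if pvIsTag line then
    let c := st.1 + 1
    if c == 1 then (c, false, st.2.2 ++ [line])
    else if PySem.Int.mod c 2 == 0 then (c, true, st.2.2)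
    else (c, false, st.2.2 ++ [line])
  else if !st.2.1 then (st.1, st.2.1, st.2.2 ++ [line])
  else st

def filter_ad_segments (m3u8_content : String) : String :=
  let lines := (PySem.Str.split? (PySem.Str.strip m3u8_content) "\n").getD []
  let st := lines.foldl pvStepA (0, false, [])
  PySem.Str.join "\n" st.2.2

-- ===== PORT B =====
-- B's while loop: pair up consecutive tag positions (after the first) into removal intervals
def pvChunkB (rest : List Int) (n : Int) : List (Int × Int) :=
  match rest with
  | [] => []
  | [a] => [(a, n)]
  | a :: b :: r => (a, b) :: pvChunkB r n

def filter_ad_segments_alt (m3u8_content : String) : String :=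
  let lines := (PySem.Str.split? (PySem.Str.strip m3u8_content) "\n").getD []
  let tags := ((PySem.List.enumerate lines).filter (fun p => pvIsTag p.2)).map (fun p => p.1)
  let intervals := pvChunkB (PySem.List.slice tags (some 1) none) (PySem.List.len lines)
  PySem.Str.join "\n"
    (((PySem.List.enumerate lines).filter
        (fun p => ! intervals.any (fun se => se.1 ≤ p.1 && p.1 < se.2))).map (fun p => p.2))

-- ===== PRECONDITION & SPEC =====
def Spec_filter_ad_segments (m3u8_content : String) (out : String) : Prop := out = filter_ad_segments_alt m3u8_content
instance (m3u8_content : String) (out : String) : Decidable (Spec_filter_ad_segments m3u8_content out) := by unfold Spec_filter_ad_segments; infer_instance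

-- ===== CLAIM (what is proved, stated in full; the proofs are below) =====
def Claim_equal_filter_ad_segments : Prop := ∀ (m3u8_content : String), Dom_filter_ad_segments m3u8_content → Spec_filter_ad_segments m3u8_content (filter_ad_segments m3u8_content)

-- ===== LEMMAS AND PROOFS =====

-- 0-based positions of the tag lines
def pvTagIdx : List String → List Nat
  | [] => []
  | l :: ls => (if pvIsTag l then [0] else []) ++ (pvTagIdx ls).map (· + 1)

-- Nat-level mirror of pvChunkB
def pvChunkN : List Nat → Nat → List (Nat × Nat)
  | [], _ => []
  | [a], n => [(a, n)]
  | a :: b :: r, n => (a, b) :: pvChunkN r n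

-- removal intervals as seen from a suffix whose preceding prefix contained c tags
def pvIvs (c : Nat) (ts : List Nat) (n : Nat) : List (Nat × Nat) :=
  if c = 0 then pvChunkN (ts.drop 1) n
  else if c % 2 = 1 then pvChunkN ts n
  else (0, ts.headD n) :: pvChunkN (ts.drop 1) n

def pvInAny (ivs : List (Nat × Nat)) (i : Nat) : Bool := ivs.any (fun se => se.1 ≤ i && i < se.2)

-- keep decision given the count of tags strictly before the line
def pvKeepAt (c : Nat) (tag : Bool) : Bool := if tag then c % 2 == 0 else (c == 0 || c % 2 == 1)

-- reference filter (what A's state machine computes)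
def pvSpec : Nat → List String → List String
  | _, [] => []
  | c, l :: ls =>
      (if pvKeepAt c (pvIsTag l) then [l] else []) ++ pvSpec (if pvIsTag l then c + 1 else c) ls

theorem pvA_fold (ls : List String) : ∀ (c : Nat) (acc : List String),
    (ls.foldl pvStepA ((c : Int), decide (0 < c ∧ c % 2 = 0), acc)).2.2 = acc ++ pvSpec c ls := by
  induction ls with
  | nil => intro c acc; simp [pvSpec]
  | cons l ls ih =>
    intro c acc
    rw [List.foldl_cons]
    by_cases ht : pvIsTag l
    · have hc1 : ((c : Int) + 1) = ((c + 1 : Nat) : Int) := by push_cast; ring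
      by_cases hc0 : c = 0
      · subst hc0
        have hstep : pvStepA ((0 : Nat), decide (0 < 0 ∧ 0 % 2 = 0), acc) l
            = (((1 : Nat) : Int), decide (0 < 1 ∧ 1 % 2 = 0), acc ++ [l]) := by
          simp [pvStepA, ht]
        rw [hstep, ih 1 (acc ++ [l])]
        simp [pvSpec, pvKeepAt, ht]
      · have hne : (((c : Int) + 1) == 1) = false := by
          simp only [beq_eq_false_iff_ne, ne_eq]
          omega
        have hmod : PySem.Int.mod ((c : Int) + 1) 2 = (((c + 1) % 2 : Nat) : Int) := by
          rw [hc1]; exact_mod_cast PySem.Int.mod_natCast (c+1) 2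
        by_cases hpar : (c + 1) % 2 = 0
        · have hstep : pvStepA (((c : Nat) : Int), decide (0 < c ∧ c % 2 = 0), acc) l
              = (((c + 1 : Nat) : Int), decide (0 < c + 1 ∧ (c + 1) % 2 = 0), acc) := by
            simp only [pvStepA, ht, if_pos, hne, Bool.false_eq_true, if_neg, not_false_iff,
              hmod, hpar, hc1]
            have hdvd : (2:Int) ∣ ((c : Int) + 1) := by omega
            simp [hpar, hc0, hdvd]
          rw [hstep, ih (c+1) acc]
          have hkeep : pvKeepAt c true = false := by
            simp [pvKeepAt]
            omega
          simp [pvSpec, ht, hkeep]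
        · have hpar1 : (c + 1) % 2 = 1 := by omega
          have hstep : pvStepA (((c : Nat) : Int), decide (0 < c ∧ c % 2 = 0), acc) l
              = (((c + 1 : Nat) : Int), decide (0 < c + 1 ∧ (c + 1) % 2 = 0), acc ++ [l]) := by
            simp only [pvStepA, ht, if_pos, hne, Bool.false_eq_true, if_neg, not_false_iff,
              hmod, hpar1, hc1]
            simp [hpar]
            omega
          rw [hstep, ih (c+1) (acc ++ [l])]
          have hkeep : pvKeepAt c true = true := by
            simp [pvKeepAt]
            omega
          simp [pvSpec, ht, hkeep]
    · by_cases hk : 0 < c ∧ c % 2 = 0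
      · have hstep : pvStepA (((c : Nat) : Int), decide (0 < c ∧ c % 2 = 0), acc) l
            = (((c : Nat) : Int), decide (0 < c ∧ c % 2 = 0), acc) := by
          simp [pvStepA, ht, hk]
        rw [hstep, ih c acc]
        have hkeep : pvKeepAt c false = false := by
          simp [pvKeepAt]
          omega
        simp [pvSpec, ht, hkeep]
      · have hstep : pvStepA (((c : Nat) : Int), decide (0 < c ∧ c % 2 = 0), acc) l
            = (((c : Nat) : Int), decide (0 < c ∧ c % 2 = 0), acc ++ [l]) := by
          simp [pvStepA, ht, hk]
        rw [hstep, ih c (acc ++ [l])]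
        have hkeep : pvKeepAt c false = true := by
          simp [pvKeepAt]
          omega
        simp [pvSpec, ht, hkeep]

theorem pvTags_eq (L : List String) : ∀ (s : Int),
    ((PySem.List.enumerate L s).filter (fun p => pvIsTag p.2)).map (fun p => p.1)
      = (pvTagIdx L).map (fun (i : Nat) => s + (i : Int)) := by
  induction L with
  | nil => intro s; simp [PySem.List.enumerate, pvTagIdx]
  | cons l ls ih =>
    intro s
    rw [PySem.List.enumerate_cons]
    have htail : ((PySem.List.enumerate ls (s+1)).filter (fun p => pvIsTag p.2)).map (fun p => p.1)
        = ((pvTagIdx ls).map (· + 1)).map (fun (i : Nat) => s + (i : Int)) := by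
      rw [ih (s+1), List.map_map]
      apply List.map_congr_left
      intro i _
      simp only [Function.comp_apply]
      push_cast
      ring
    by_cases ht : pvIsTag l
    · simp only [List.filter_cons, ht, if_pos, List.map_cons, pvTagIdx, List.cons_append,
        List.nil_append]
      rw [htail]
      norm_num
    · simp only [List.filter_cons, ht, pvTagIdx, List.nil_append, Bool.false_eq_true,
        if_neg, not_false_iff]
      rw [htail]

theorem pvChunkB_cast : ∀ (ts : List Nat) (n : Nat),
    pvChunkB (ts.map (fun (i : Nat) => (i : Int))) (n : Int)
      = (pvChunkN ts n).map (fun q => ((q.1 : Int), (q.2 : Int)))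
  | [], n => by simp [pvChunkB, pvChunkN]
  | [a], n => by simp [pvChunkB, pvChunkN]
  | a :: b :: r, n => by
      simpa [pvChunkB, pvChunkN] using pvChunkB_cast r n

theorem pvChunkN_shift : ∀ (ts : List Nat) (n : Nat),
    pvChunkN (ts.map (· + 1)) (n + 1) = (pvChunkN ts n).map (fun q => (q.1 + 1, q.2 + 1))
  | [], n => by simp [pvChunkN]
  | [a], n => by simp [pvChunkN]
  | a :: b :: r, n => by simpa [pvChunkN] using pvChunkN_shift r n

theorem pvInAny_shift (ivs : List (Nat × Nat)) (i : Nat) :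
    pvInAny (ivs.map (fun q => (q.1 + 1, q.2 + 1))) (i + 1) = pvInAny ivs i := by
  unfold pvInAny
  induction ivs with
  | nil => rfl
  | cons q r ih => simp [List.any_cons, ih]

theorem pvInAny_shift_zero (ivs : List (Nat × Nat)) :
    pvInAny (ivs.map (fun q => (q.1 + 1, q.2 + 1))) 0 = false := by
  unfold pvInAny
  induction ivs with
  | nil => rfl
  | cons q r ih => simp [List.any_cons, ih]

theorem pvHeadD_shift (ts : List Nat) (n : Nat) :
    (ts.map (· + 1)).headD (n + 1) = ts.headD n + 1 := by
  cases ts <;> simp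

theorem pvInAny_cons (q : Nat × Nat) (r : List (Nat × Nat)) (i : Nat) :
    pvInAny (q :: r) i = ((q.1 ≤ i && i < q.2) || pvInAny r i) := by
  simp [pvInAny, List.any_cons]

theorem pvP3 : ∀ (L : List String) (c i : Nat), i < L.length →
    pvInAny (pvIvs c (pvTagIdx L) L.length) i
      = ! pvKeepAt (c + (L.take i).countP pvIsTag) (pvIsTag (L.getD i "")) := by
  intro L
  induction L with
  | nil => intro c i h; simp at h
  | cons l ls ih =>
    intro c i hi
    have hdm : ((pvTagIdx ls).map (· + 1)).drop 1 = ((pvTagIdx ls).drop 1).map (· + 1) := by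
      cases pvTagIdx ls <;> simp
    cases i with
    | zero =>
      simp only [List.take_zero, List.countP_nil, Nat.add_zero, List.getD_cons_zero]
      by_cases ht : pvIsTag l
      · have hT : pvTagIdx (l :: ls) = 0 :: (pvTagIdx ls).map (· + 1) := by
          simp [pvTagIdx, ht]
        rw [hT, ht, List.length_cons]
        by_cases hc0 : c = 0
        · subst hc0
          have hkp : pvKeepAt 0 true = true := by simp [pvKeepAt]
          rw [hkp]
          unfold pvIvs
          rw [if_pos rfl]
          simp only [List.drop_succ_cons, List.drop_zero]
          rw [pvChunkN_shift, pvInAny_shift_zero]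
          rfl
        · by_cases hodd : c % 2 = 1
          · have hkp : pvKeepAt c true = false := by simp [pvKeepAt]; omega
            rw [hkp]
            unfold pvIvs
            rw [if_neg hc0, if_pos hodd]
            cases hts : pvTagIdx ls with
            | nil => simp [pvChunkN, pvInAny]
            | cons t tr => simp [pvChunkN, pvInAny_cons]
          · have hkp : pvKeepAt c true = true := by simp [pvKeepAt]; omega
            rw [hkp]
            unfold pvIvs
            rw [if_neg hc0, if_neg hodd]
            simp only [List.headD_cons, List.drop_succ_cons, List.drop_zero]
            rw [pvInAny_cons, pvChunkN_shift, pvInAny_shift_zero]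
            simp
      · have hT : pvTagIdx (l :: ls) = (pvTagIdx ls).map (· + 1) := by
          simp [pvTagIdx, ht]
        rw [hT, List.length_cons]
        have htf : pvIsTag l = false := by simp [ht]
        rw [htf]
        by_cases hc0 : c = 0
        · subst hc0
          have hkp : pvKeepAt 0 false = true := by simp [pvKeepAt]
          rw [hkp]
          unfold pvIvs
          rw [if_pos rfl, hdm, pvChunkN_shift, pvInAny_shift_zero]
          rfl
        · by_cases hodd : c % 2 = 1
          · have hkp : pvKeepAt c false = true := by simp [pvKeepAt]; omega
            rw [hkp]
            unfold pvIvs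
            rw [if_neg hc0, if_pos hodd, pvChunkN_shift, pvInAny_shift_zero]
            rfl
          · have hkp : pvKeepAt c false = false := by simp [pvKeepAt]; omega
            rw [hkp]
            unfold pvIvs
            rw [if_neg hc0, if_neg hodd, pvInAny_cons, hdm, pvChunkN_shift,
              pvInAny_shift_zero]
            have hh : ((pvTagIdx ls).map (· + 1)).headD (ls.length + 1) ≠ 0 := by
              rw [pvHeadD_shift]; omega
            simp only [Bool.or_false, Bool.not_false]
            simp [Nat.pos_of_ne_zero hh]
    | succ j =>
      have hj : j < ls.length := by simpa using hi
      simp only [List.take_succ_cons, List.countP_cons, List.getD_cons_succ]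
      by_cases ht : pvIsTag l
      · have hT : pvTagIdx (l :: ls) = 0 :: (pvTagIdx ls).map (· + 1) := by
          simp [pvTagIdx, ht]
        have hR : c + ((ls.take j).countP pvIsTag + if pvIsTag l = true then 1 else 0)
            = (c + 1) + (ls.take j).countP pvIsTag := by simp [ht]; omega
        rw [hT, hR, ← ih (c+1) j hj, List.length_cons]
        by_cases hc0 : c = 0
        · subst hc0
          unfold pvIvs
          rw [if_pos rfl, if_neg (by omega : ¬ (0+1 : Nat) = 0),
            if_pos (by omega : (0+1 : Nat) % 2 = 1)]
          simp only [List.drop_succ_cons, List.drop_zero]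
          rw [pvChunkN_shift, pvInAny_shift]
        · by_cases hodd : c % 2 = 1
          · unfold pvIvs
            rw [if_neg hc0, if_pos hodd, if_neg (by omega : ¬ (c+1) = 0),
              if_neg (by omega : ¬ (c+1) % 2 = 1)]
            cases hts : pvTagIdx ls with
            | nil =>
              simp only [List.map_nil, pvChunkN, List.headD_nil, List.drop_nil]
              rw [pvInAny_cons, pvInAny_cons]
              simp [pvInAny, Nat.add_lt_add_iff_right]
            | cons t tr =>
              simp only [List.map_cons, pvChunkN, List.headD_cons, List.drop_succ_cons]
              rw [pvInAny_cons, pvInAny_cons, pvChunkN_shift, pvInAny_shift]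
              simp [Nat.add_lt_add_iff_right]
          · unfold pvIvs
            rw [if_neg hc0, if_neg hodd, if_neg (by omega : ¬ (c+1) = 0),
              if_pos (by omega : (c+1) % 2 = 1)]
            simp only [List.headD_cons, List.drop_succ_cons, List.drop_zero]
            rw [pvInAny_cons, pvChunkN_shift, pvInAny_shift]
            simp
      · have hT : pvTagIdx (l :: ls) = (pvTagIdx ls).map (· + 1) := by
          simp [pvTagIdx, ht]
        have hR : c + ((ls.take j).countP pvIsTag + if pvIsTag l = true then 1 else 0)
            = c + (ls.take j).countP pvIsTag := by simp [ht]
        rw [hT, hR, ← ih c j hj, List.length_cons]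
        by_cases hc0 : c = 0
        · subst hc0
          unfold pvIvs
          rw [if_pos rfl, if_pos rfl, hdm, pvChunkN_shift, pvInAny_shift]
        · by_cases hodd : c % 2 = 1
          · unfold pvIvs
            rw [if_neg hc0, if_pos hodd, if_neg hc0, if_pos hodd,
              pvChunkN_shift, pvInAny_shift]
          · unfold pvIvs
            rw [if_neg hc0, if_neg hodd, if_neg hc0, if_neg hodd,
              pvInAny_cons, pvInAny_cons, hdm, pvChunkN_shift, pvInAny_shift,
              pvHeadD_shift]
            simp [Nat.add_lt_add_iff_right]

theorem pvP1 : ∀ (L : List String) (c : Nat),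
    pvSpec c L = ((List.range L.length).filter
        (fun i => pvKeepAt (c + (L.take i).countP pvIsTag) (pvIsTag (L.getD i "")))).map
        (fun i => L.getD i "") := by
  intro L
  induction L with
  | nil => intro c; simp [pvSpec]
  | cons l ls ih =>
    intro c
    rw [List.length_cons, List.range_succ_eq_map, List.filter_cons]
    have h0 : pvKeepAt (c + ((l :: ls).take 0).countP pvIsTag) (pvIsTag ((l :: ls).getD 0 ""))
        = pvKeepAt c (pvIsTag l) := by simp
    rw [h0]
    have e1 : List.filter
          (fun i => pvKeepAt (c + ((l :: ls).take i).countP pvIsTag) (pvIsTag ((l :: ls).getD i "")))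
          (List.map Nat.succ (List.range ls.length))
        = List.map Nat.succ (List.filter
          (fun i => pvKeepAt ((if pvIsTag l then c + 1 else c) + (ls.take i).countP pvIsTag)
            (pvIsTag (ls.getD i ""))) (List.range ls.length)) := by
      rw [List.filter_map]
      congr 1
      apply List.filter_congr
      intro i _
      simp only [Function.comp_apply, Nat.succ_eq_add_one, List.take_succ_cons,
        List.countP_cons, List.getD_cons_succ]
      congr 1
      by_cases ht : pvIsTag l <;> simp [ht] <;> omega
    rw [e1]
    by_cases hk : pvKeepAt c (pvIsTag l)
    · rw [if_pos hk]
      simp only [pvSpec, hk, if_pos, List.singleton_append, List.map_cons, List.map_map]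
      congr 1
      rw [ih (if pvIsTag l then c + 1 else c)]
      apply List.map_congr_left
      intro i _
      simp [Function.comp, Nat.succ_eq_add_one]
    · rw [if_neg hk]
      simp only [pvSpec, hk, Bool.false_eq_true, if_neg, not_false_iff, List.nil_append,
        List.map_map]
      rw [ih (if pvIsTag l then c + 1 else c)]
      apply List.map_congr_left
      intro i _
      simp [Function.comp, Nat.succ_eq_add_one]

theorem pvEnumFilter (L : List String) : ∀ (s : Nat) (q : Int → Bool),
    ((PySem.List.enumerate L (s : Int)).filter (fun p => q p.1)).map (fun p => p.2)
      = ((List.range L.length).filter (fun i => q ((s + i : Nat) : Int))).map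
        (fun i => L.getD i "") := by
  induction L with
  | nil => intro s q; simp [PySem.List.enumerate]
  | cons l ls ih =>
    intro s q
    rw [PySem.List.enumerate_cons, List.length_cons, List.range_succ_eq_map,
      List.filter_cons, List.filter_cons]
    have h1 : ((s:Int) + 1) = ((s+1 : Nat) : Int) := by push_cast; ring
    have htail : ((PySem.List.enumerate ls ((s:Int)+1)).filter (fun p => q p.1)).map (fun p => p.2)
        = ((List.map Nat.succ (List.range ls.length)).filter
            (fun i => q ((s + i : Nat) : Int))).map (fun i => (l :: ls).getD i "") := by
      rw [h1, ih (s+1) q, List.filter_map, List.map_map]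
      have e1 : List.filter ((fun i => q ((s + i : Nat) : Int)) ∘ Nat.succ) (List.range ls.length)
          = List.filter (fun i => q ((s + 1 + i : Nat) : Int)) (List.range ls.length) :=
        List.filter_congr (by
          intro i _
          simp only [Function.comp_apply, Nat.succ_eq_add_one]
          congr 1
          omega)
      rw [e1]
      symm
      apply List.map_congr_left
      intro i _
      simp [Function.comp, Nat.succ_eq_add_one]
    have h2 : (q ((s + 0 : Nat) : Int)) = q (s : Int) := by norm_num
    rw [h2]
    by_cases hq : q (s : Int)
    · simp only [hq, if_pos, List.map_cons]
      rw [htail]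
      rfl
    · simp only [hq, Bool.false_eq_true, if_neg, not_false_iff]
      rw [htail]

theorem pvMain (L : List String) :
    (L.foldl pvStepA (0, false, [])).2.2
      = (((PySem.List.enumerate L).filter
          (fun p => ! (pvChunkB (PySem.List.slice (((PySem.List.enumerate L).filter
              (fun p => pvIsTag p.2)).map (fun p => p.1)) (some 1) none)
            (PySem.List.len L)).any (fun se => se.1 ≤ p.1 && p.1 < se.2))).map (fun p => p.2)) := by
  have hA : (L.foldl pvStepA (0, false, [])).2.2 = pvSpec 0 L := by
    have h := pvA_fold L 0 []
    simpa using h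
  have htags : ((PySem.List.enumerate L).filter (fun p => pvIsTag p.2)).map (fun p => p.1)
      = (pvTagIdx L).map (fun (i : Nat) => (i : Int)) := by
    have h := pvTags_eq L 0
    simpa using h
  have hslice : PySem.List.slice ((pvTagIdx L).map (fun (i : Nat) => (i : Int))) (some 1) none
      = ((pvTagIdx L).drop 1).map (fun (i : Nat) => (i : Int)) := by
    rw [PySem.List.slice_from_one, ← List.drop_one, ← List.map_drop]
  have hchunk : pvChunkB (((pvTagIdx L).drop 1).map (fun (i : Nat) => (i : Int)))
        ((L.length : Int))
      = (pvIvs 0 (pvTagIdx L) L.length).map (fun q => ((q.1 : Int), (q.2 : Int))) := by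
    rw [pvChunkB_cast]
    simp [pvIvs]
  rw [hA, htags, hslice, PySem.List.len_eq, hchunk]
  set ivs := pvIvs 0 (pvTagIdx L) L.length with hivs
  have hq : ∀ (i : Nat),
      (! ((ivs.map (fun q => ((q.1 : Int), (q.2 : Int)))).any
          (fun se => se.1 ≤ (i : Int) && (i : Int) < se.2)))
        = ! pvInAny ivs i := by
    intro i
    congr 1
    rw [List.any_map]
    refine List.any_congr rfl ?_
    intro q
    simp [pvInAny]
  have hEnum := pvEnumFilter L 0
    (fun x => ! ((ivs.map (fun q => ((q.1 : Int), (q.2 : Int)))).any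
        (fun se => se.1 ≤ x && x < se.2)))
  simp only [Nat.cast_zero, Nat.zero_add] at hEnum
  rw [show ((PySem.List.enumerate L) = PySem.List.enumerate L 0) from rfl]
  rw [hEnum]
  rw [pvP1 L 0]
  congr 1
  apply List.filter_congr
  intro i hi
  rw [hq i]
  rw [pvP3 L 0 i (by simpa using hi)]
  simp

-- ===== VERDICT (by name: the statement is the Claim_ definition above) =====
theorem filter_ad_segments_spec : Claim_equal_filter_ad_segments := by
  intro m _
  unfold Spec_filter_ad_segments filter_ad_segments filter_ad_segments_alt
  exact congrArg (PySem.Str.join "\n") (pvMain _)
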